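-- pv_equiv track=rewrite | github.com/shreyashi2609/AIGuessMaster | backend/ai_hints.py | get_binary_search_hint
-- ===== SOURCE A (Python) =====
-- def get_binary_search_hint(previous_guesses, secret_number):
--     """
--     Suggest using binary search strategy
--
--     Args:
--         previous_guesses (list): List of previous guesses
--         secret_number (int): The secret number
--
--     Returns:
--         str: Binary search advice
--     """
--     if len(previous_guesses) == 0:
--         return "Try starting with 50! This is the middle of the range and will help you eliminate half the possibilities."
--
--     # Find the current search range
--     too_low_guesses = [g for g in previous_guesses if g < secret_number]
--     too_high_guesses = [g for g in previous_guesses if g > secret_number]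
--
--     lower_bound = max(too_low_guesses) if too_low_guesses else 1
--     upper_bound = min(too_high_guesses) if too_high_guesses else 100
--
--     suggested_guess = (lower_bound + upper_bound) // 2
--
--     return f"Try guessing {suggested_guess}! This is the middle of your current search range ({lower_bound}-{upper_bound})."
-- ===== SOURCE B (Python) =====
-- def get_binary_search_hint(previous_guesses, secret_number):
--     if len(previous_guesses) == 0:
--         return "Try starting with 50! This is the middle of the range and will help you eliminate half the possibilities."
--
--     # Sorted ascending: guesses below the secret form a prefix (the last one
--     # seen is the predecessor), and the first guess above it is the successor.
--     ordered = sorted(previous_guesses)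
--     lower_bound, upper_bound = 1, 100
--     for g in ordered:
--         if g < secret_number:
--             lower_bound = g
--         elif g > secret_number:
--             upper_bound = g
--             break
--
--     suggested_guess = (lower_bound + upper_bound) // 2
--
--     return f"Try guessing {suggested_guess}! This is the middle of your current search range ({lower_bound}-{upper_bound})."
-- ===== Notes on version B (the rewrite author's own statement) =====
-- stated objective: alternative
-- what changed: Instead of filtering the list twice and taking max/min, B sorts the guesses and walks the ascending list once with an early stop: the lower bound is the predecessor of the secret in sorted order and the upper bound is its successor (the first element above it).
import Mathlib
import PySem

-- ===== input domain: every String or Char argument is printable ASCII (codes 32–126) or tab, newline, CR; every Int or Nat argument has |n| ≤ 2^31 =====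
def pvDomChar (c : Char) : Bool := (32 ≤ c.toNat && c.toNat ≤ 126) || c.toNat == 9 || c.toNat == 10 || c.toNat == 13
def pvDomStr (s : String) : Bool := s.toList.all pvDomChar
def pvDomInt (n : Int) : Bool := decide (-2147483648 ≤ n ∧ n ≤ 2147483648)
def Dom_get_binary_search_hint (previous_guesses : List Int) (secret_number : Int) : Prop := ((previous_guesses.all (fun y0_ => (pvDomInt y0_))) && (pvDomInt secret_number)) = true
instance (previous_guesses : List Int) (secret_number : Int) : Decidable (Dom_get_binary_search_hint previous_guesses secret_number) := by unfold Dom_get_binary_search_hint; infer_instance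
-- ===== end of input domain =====

-- B sorts the guesses and walks the ascending list once, breaking at the first element above the secret (predecessor/successor) instead of A's two filters plus max()/min(); alternative algorithm, same return value.


-- ===== PORT A =====
def get_binary_search_hint (previous_guesses : List Int) (secret_number : Int) : String :=
  if previous_guesses.length == 0 then
    "Try starting with 50! This is the middle of the range and will help you eliminate half the possibilities."
  else
    let too_low_guesses := previous_guesses.filter (fun g => decide (g < secret_number))
    let too_high_guesses := previous_guesses.filter (fun g => decide (g > secret_number))
    let lower_bound := match PySem.List.max? too_low_guesses (fun y => y) with
      | some m => m
      | none => 1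
    let upper_bound := match PySem.List.min? too_high_guesses (fun y => y) with
      | some m => m
      | none => 100
    let suggested_guess := PySem.Int.floordiv (lower_bound + upper_bound) 2
    "Try guessing " ++ PySem.Int.toStr suggested_guess ++
      "! This is the middle of your current search range (" ++
      PySem.Int.toStr lower_bound ++ "-" ++ PySem.Int.toStr upper_bound ++ ")."

-- ===== PORT B =====
-- Source B's walk loop over the ascending list (break = returning at the first element above the secret)
def bsWalk (ordered : List Int) (secret_number : Int) (best_low : Int) : Int × Int :=
  match ordered with
  | [] => (best_low, 100)
  | g :: t =>
    if g < secret_number then bsWalk t secret_number g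
    else if g > secret_number then (best_low, g)
    else bsWalk t secret_number best_low

def get_binary_search_hint_alt (previous_guesses : List Int) (secret_number : Int) : String :=
  if previous_guesses.length == 0 then
    "Try starting with 50! This is the middle of the range and will help you eliminate half the possibilities."
  else
    let ordered := PySem.List.sorted previous_guesses (fun y => y) false
    let bounds := bsWalk ordered secret_number 1
    let lower_bound := bounds.1
    let upper_bound := bounds.2
    let suggested_guess := PySem.Int.floordiv (lower_bound + upper_bound) 2
    "Try guessing " ++ PySem.Int.toStr suggested_guess ++
      "! This is the middle of your current search range (" ++
      PySem.Int.toStr lower_bound ++ "-" ++ PySem.Int.toStr upper_bound ++ ")."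

-- ===== PRECONDITION & SPEC =====
def Spec_get_binary_search_hint (previous_guesses : List Int) (secret_number : Int) (out : String) : Prop := out = get_binary_search_hint_alt previous_guesses secret_number
instance (previous_guesses : List Int) (secret_number : Int) (out : String) : Decidable (Spec_get_binary_search_hint previous_guesses secret_number out) := by unfold Spec_get_binary_search_hint; infer_instance

-- ===== CLAIM (what is proved, stated in full; the proofs are below) =====
def Claim_equal_get_binary_search_hint : Prop := ∀ (previous_guesses : List Int) (secret_number : Int), Dom_get_binary_search_hint previous_guesses secret_number → Spec_get_binary_search_hint previous_guesses secret_number (get_binary_search_hint previous_guesses secret_number)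

-- ===== LEMMAS AND PROOFS =====

-- the Python 'max(l) if l else d' / 'min(l) if l else d' values depend only on the multiset of l
theorem maxMatch_perm (l₁ l₂ : List Int) (d : Int) (hp : l₁.Perm l₂) :
    (match PySem.List.max? l₁ (fun y => y) with | some m => m | none => d) =
    (match PySem.List.max? l₂ (fun y => y) with | some m => m | none => d) := by
  cases h1 : PySem.List.max? l₁ (fun y => y) with
  | none =>
    rw [PySem.List.max?_eq_none_iff] at h1
    subst h1
    rw [List.nil_perm] at hp
    subst hp; rfl
  | some m =>
    cases h2 : PySem.List.max? l₂ (fun y => y) with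
    | none =>
      rw [PySem.List.max?_eq_none_iff] at h2
      subst h2
      rw [List.perm_nil] at hp
      simp [hp, PySem.List.max?] at h1
    | some m' =>
      have hm := PySem.List.max?_mem h1
      have hm' := PySem.List.max?_mem h2
      have h12 := PySem.List.max?_isMax h1 m' (hp.symm.mem_iff.mp hm')
      have h21 := PySem.List.max?_isMax h2 m (hp.mem_iff.mp hm)
      simpa using le_antisymm h21 h12

theorem minMatch_perm (l₁ l₂ : List Int) (d : Int) (hp : l₁.Perm l₂) :
    (match PySem.List.min? l₁ (fun y => y) with | some m => m | none => d) =
    (match PySem.List.min? l₂ (fun y => y) with | some m => m | none => d) := by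
  cases h1 : PySem.List.min? l₁ (fun y => y) with
  | none =>
    rw [PySem.List.min?_eq_none_iff] at h1
    subst h1
    rw [List.nil_perm] at hp
    subst hp; rfl
  | some m =>
    cases h2 : PySem.List.min? l₂ (fun y => y) with
    | none =>
      rw [PySem.List.min?_eq_none_iff] at h2
      subst h2
      rw [List.perm_nil] at hp
      simp [hp, PySem.List.min?] at h1
    | some m' =>
      have hm := PySem.List.min?_mem h1
      have hm' := PySem.List.min?_mem h2
      have h12 := PySem.List.min?_isMin h1 m' (hp.symm.mem_iff.mp hm')
      have h21 := PySem.List.min?_isMin h2 m (hp.mem_iff.mp hm)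
      simpa using le_antisymm h12 h21

theorem foldl_min_of_ge (l : List Int) (g : Int) (h : ∀ y ∈ l, g ≤ y) :
    l.foldl min g = g := by
  induction l with
  | nil => rfl
  | cons x t ih =>
    simp only [List.foldl_cons, min_eq_left (h x (by simp))]
    exact ih (fun y hy => h y (by simp [hy]))

-- the walk over an ascending list computes exactly A's two bound expressions
theorem bsWalk_spec (s : List Int) (x : Int) (lb : Int)
    (hs : s.Pairwise (fun a b => a ≤ b)) :
    bsWalk s x lb =
      ((match PySem.List.max? (s.filter (fun g => decide (g < x))) (fun y => y) with
         | some m => m | none => lb),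
       (match PySem.List.min? (s.filter (fun g => decide (g > x))) (fun y => y) with
         | some m => m | none => 100)) := by
  induction s generalizing lb with
  | nil => rfl
  | cons g t ih =>
    rw [List.pairwise_cons] at hs
    obtain ⟨hg, ht⟩ := hs
    by_cases h1 : g < x
    · have hnot : ¬ g > x := by omega
      rw [bsWalk, if_pos h1, ih g ht]
      simp only [List.filter_cons, decide_eq_true_eq, h1, hnot, if_true, if_false]
      congr 1
      rw [PySem.List.max?_id_cons]
      cases hft : t.filter (fun g => decide (g < x)) with
      | nil => rfl
      | cons a r =>
        rw [PySem.List.max?_id_cons]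
        simp only [List.foldl_cons]
        have hga : g ≤ a := hg a (List.mem_of_mem_filter (by rw [hft]; simp))
        rw [max_eq_right hga]
    · by_cases h2 : g > x
      · rw [bsWalk, if_neg h1, if_pos h2]
        have hlow : t.filter (fun g => decide (g < x)) = [] := by
          rw [List.filter_eq_nil_iff]
          intro y hy
          have := hg y hy
          simp; omega
        have hnone : (g :: t).filter (fun g => decide (g < x)) = [] := by
          simp only [List.filter_cons, decide_eq_true_eq, h1, if_false, hlow]
        rw [hnone]
        simp only [List.filter_cons, decide_eq_true_eq, h2, if_true]
        rw [PySem.List.min?_id_cons]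
        have : (t.filter (fun g => decide (g > x))).foldl min g = g := by
          apply foldl_min_of_ge
          intro y hy
          exact hg y (List.mem_of_mem_filter hy)
        rw [this]
        rfl
      · have hgx : g = x := by omega
        rw [bsWalk, if_neg h1, if_neg h2, ih lb ht]
        simp only [List.filter_cons, decide_eq_true_eq, h1, h2, if_false]

-- ===== VERDICT (by name: the statement is the Claim_ definition above) =====
theorem get_binary_search_hint_spec : Claim_equal_get_binary_search_hint := by
  intro prev x _
  unfold Spec_get_binary_search_hint get_binary_search_hint get_binary_search_hint_alt
  by_cases h : prev.length = 0
  · simp [h]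
  · simp only [h, beq_iff_eq, if_false]
    have hperm : (PySem.List.sorted prev (fun y => y) false).Perm prev :=
      PySem.List.sorted_perm prev (fun y => y) false
    have hpw : (PySem.List.sorted prev (fun y => y) false).Pairwise (fun a b => a ≤ b) := by
      simpa using PySem.List.sorted_pairwise prev (fun y => y)
    rw [bsWalk_spec _ _ _ hpw]
    rw [maxMatch_perm _ (prev.filter (fun g => decide (g < x))) 1 (hperm.filter _),
        minMatch_perm _ (prev.filter (fun g => decide (g > x))) 100 (hperm.filter _)]
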